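-- pv_equiv track=rewrite | github.com/MrBrantCode/unitest_baseline | mut_generate/mist_train_cf/cf_55173/solution.py | categorize_and_sort
-- ===== SOURCE A (Python) =====
-- def categorize_and_sort(arr):
--     vowel_dict = {}
--     for word in arr:
--         vowel_count = sum(word.lower().count(c) for c in 'aeiou')
--         if vowel_count not in vowel_dict:
--             vowel_dict[vowel_count] = [word]
--         else:
--             vowel_dict[vowel_count].append(word)
--     for key in vowel_dict:
--         vowel_dict[key] = sorted(vowel_dict[key], key=len)
--
--     return vowel_dict
-- ===== SOURCE B (Python) =====
-- VOWELS = frozenset('aeiou')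
--
--
-- def _vowels(word):
--     return sum(1 for ch in word.lower() if ch in VOWELS)
--
--
-- def categorize_and_sort(arr):
--     result = {_vowels(w): [] for w in arr}      # keys in first-appearance order
--     for w in sorted(arr, key=len):              # one stable global sort by length
--         result[_vowels(w)].append(w)            # stability keeps each bucket length-sorted
--     return result
-- ===== Notes on version B (the rewrite author's own statement) =====
-- stated objective: alternative
-- what changed: B replaces A's per-bucket sorts with one stable global sort of the whole list by length (each bucket is then length-sorted by stability) and replaces A's five full .count() scans per word with a single pass over the word's characters.
import Mathlib
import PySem

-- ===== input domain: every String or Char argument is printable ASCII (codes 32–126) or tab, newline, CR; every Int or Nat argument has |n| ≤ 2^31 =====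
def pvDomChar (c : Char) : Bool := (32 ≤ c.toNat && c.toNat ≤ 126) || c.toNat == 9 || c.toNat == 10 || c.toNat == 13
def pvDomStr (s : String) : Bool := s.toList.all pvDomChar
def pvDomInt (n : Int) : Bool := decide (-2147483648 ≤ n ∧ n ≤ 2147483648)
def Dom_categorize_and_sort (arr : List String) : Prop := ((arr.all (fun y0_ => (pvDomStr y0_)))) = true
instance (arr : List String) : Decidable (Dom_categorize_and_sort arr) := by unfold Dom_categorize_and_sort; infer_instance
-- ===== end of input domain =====

-- B replaces A's per-bucket sorts by ONE stable global sort by length (buckets stay length-sorted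
-- by stability) and A's five full count() scans per word by a single pass over the word (objective: alternative).

-- ===== PORT A =====
-- sum(word.lower().count(c) for c in 'aeiou')
def vowelsA (word : String) : Int :=
  (("aeiou".toList).map (fun c => (PySem.Chars.count (PySem.Chars.lower word.toList) [c] : Int))).sum

def categorize_and_sort (arr : List String) : List (Int × List String) :=
  let vowel_dict : PySem.Dict Int (List String) :=
    arr.foldl (fun d word =>
      let vowel_count := vowelsA word
      if d.contains vowel_count = false then d.insert vowel_count [word]
      else d.insert vowel_count (d.getD vowel_count [] ++ [word])) PySem.Dict.empty
  let vowel_dict2 :=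
    vowel_dict.keys.foldl (fun d key =>
      d.insert key (PySem.List.sorted (d.getD key []) (fun w => PySem.Str.len w))) vowel_dict
  vowel_dict2.items

-- ===== PORT B =====
def VOWELS : PySem.Set Char := PySem.Set.ofList "aeiou".toList

-- sum(1 for ch in word.lower() if ch in VOWELS)
def vowelsB (word : String) : Int :=
  (PySem.Chars.lower word.toList).foldl
    (fun acc ch => if PySem.Set.contains VOWELS ch then acc + 1 else acc) 0

def categorize_and_sort_alt (arr : List String) : List (Int × List String) :=
  let result : PySem.Dict Int (List String) :=
    arr.foldl (fun d w => d.insert (vowelsB w) []) PySem.Dict.empty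
  let result2 :=
    (PySem.List.sorted arr (fun w => PySem.Str.len w)).foldl
      (fun d w => d.modify (vowelsB w) [] (fun l => l ++ [w])) result
  result2.items

-- ===== PRECONDITION & SPEC =====
def Spec_categorize_and_sort (arr : List String) (out : List (Int × List String)) : Prop := out = categorize_and_sort_alt arr
instance (arr : List String) (out : List (Int × List String)) : Decidable (Spec_categorize_and_sort arr out) := by unfold Spec_categorize_and_sort; infer_instance

-- ===== CLAIM (what is proved, stated in full; the proofs are below) =====
def Claim_equal_categorize_and_sort : Prop := ∀ (arr : List String), Dom_categorize_and_sort arr → Spec_categorize_and_sort arr (categorize_and_sort arr)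

-- ===== LEMMAS AND PROOFS =====

-- single-character substring count is element count
lemma count_go_single (c : Char) : ∀ (fuel : Nat) (l : List Char) (acc : Nat),
    l.length ≤ fuel → PySem.Chars.count.go [c] fuel l acc = acc + l.count c := by
  intro fuel
  induction fuel with
  | zero =>
    intro l acc h
    have hl : l = [] := List.eq_nil_of_length_eq_zero (Nat.le_zero.mp h)
    subst hl
    simp [PySem.Chars.count.go]
  | succ n ih =>
    intro l acc h
    cases l with
    | nil => simp [PySem.Chars.count.go]
    | cons hd t =>
      by_cases hc : (c == hd) = true
      · have hpre : [c].isPrefixOf (hd :: t) = true := by simp [List.isPrefixOf, hc]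
        rw [show PySem.Chars.count.go [c] (n+1) (hd :: t) acc
              = PySem.Chars.count.go [c] n t (acc + 1) from by
            simp [PySem.Chars.count.go, hpre]]
        rw [ih t (acc + 1) (by simpa using Nat.lt_succ_iff.mp (by simpa using h))]
        have : hd = c := (beq_iff_eq.mp hc).symm
        subst this
        simp [List.count_cons]
        omega
      · have hpre : [c].isPrefixOf (hd :: t) = false := by simp [List.isPrefixOf]; simpa using hc
        rw [show PySem.Chars.count.go [c] (n+1) (hd :: t) acc
              = PySem.Chars.count.go [c] n t acc from by
            simp [PySem.Chars.count.go, hpre]]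
        rw [ih t acc (by simpa using Nat.lt_succ_iff.mp (by simpa using h))]
        have hcf : (c == hd) = false := by simpa using hc
        simp [List.count_cons, hcf]
        exact fun hh => hc (by simp [hh])

lemma count_single (l : List Char) (c : Char) : PySem.Chars.count l [c] = l.count c := by
  rw [show PySem.Chars.count l [c] = PySem.Chars.count.go [c] l.length l 0 from by
    simp [PySem.Chars.count]]
  simpa using count_go_single c l.length l 0 le_rfl

-- the five vowel counts sum to a single countP
lemma sum_counts (l : List Char) :
    ((("aeiou".toList)).map (fun c => (l.count c : Int))).sum
      = (l.countP (fun ch => PySem.Set.contains VOWELS ch) : Int) := by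
  induction l with
  | nil => simp
  | cons h t ih =>
    by_cases ha : h = 'a' <;> by_cases he : h = 'e' <;> by_cases hi : h = 'i' <;>
      by_cases ho : h = 'o' <;> by_cases hu : h = 'u' <;>
      simp_all [show "aeiou".toList = ['a', 'e', 'i', 'o', 'u'] from rfl,
        List.count_cons, List.countP_cons, VOWELS, PySem.Set.ofList] <;>
      push_cast <;> omega

lemma vc_eq (w : String) : vowelsA w = vowelsB w := by
  unfold vowelsA vowelsB
  rw [PySem.List.foldl_count_if (fun ch => PySem.Set.contains VOWELS ch)]
  simp only [count_single]
  rw [sum_counts]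
  simp

-- insertBy inserts at the head when it precedes everything
lemma insertBy_head {α : Type} (before : α → α → Bool) (x : α) (ys : List α)
    (h : ∀ y ∈ ys, before x y = true) :
    PySem.List.insertBy before x ys = x :: ys := by
  cases ys with
  | nil => simp [PySem.List.insertBy]
  | cons y t => simp [PySem.List.insertBy, h y (by simp)]

-- insertion keeps the list sorted
lemma pairwise_insertBy {α : Type} (key : α → Int) (x : α) (ys : List α)
    (h : ys.Pairwise (fun a b => key a ≤ key b)) :
    (PySem.List.insertBy (fun a b => decide (key a < key b)) x ys).Pairwise
      (fun a b => key a ≤ key b) := by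
  induction ys with
  | nil => simp [PySem.List.insertBy]
  | cons y t ih =>
    rw [List.pairwise_cons] at h
    obtain ⟨hy, ht⟩ := h
    by_cases hlt : key x < key y
    · rw [show PySem.List.insertBy (fun a b => decide (key a < key b)) x (y :: t) = x :: y :: t
          from by simp [PySem.List.insertBy, hlt]]
      refine List.Pairwise.cons ?_ (List.Pairwise.cons hy ht)
      intro z hz
      rcases List.mem_cons.mp hz with rfl | hz
      · exact le_of_lt hlt
      · exact le_trans (le_of_lt hlt) (hy z hz)
    · rw [show PySem.List.insertBy (fun a b => decide (key a < key b)) x (y :: t)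
            = y :: PySem.List.insertBy (fun a b => decide (key a < key b)) x t
          from by simp [PySem.List.insertBy, hlt]]
      refine List.Pairwise.cons ?_ (ih ht)
      intro z hz
      rcases (PySem.List.mem_insertBy _ _ _ _).mp hz with rfl | hz
      · exact not_lt.mp hlt
      · exact hy z hz

-- filtering commutes with one stable insertion into a sorted list
lemma filter_insertBy {α : Type} (key : α → Int) (p : α → Bool) (x : α) (ys : List α)
    (h : ys.Pairwise (fun a b => key a ≤ key b)) :
    (PySem.List.insertBy (fun a b => decide (key a < key b)) x ys).filter p
      = if p x then PySem.List.insertBy (fun a b => decide (key a < key b)) x (ys.filter p)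
        else ys.filter p := by
  induction ys with
  | nil =>
    cases hpx : p x <;> simp [PySem.List.insertBy, hpx]
  | cons y t ih =>
    rw [List.pairwise_cons] at h
    obtain ⟨hy, ht⟩ := h
    by_cases hlt : key x < key y
    · rw [show PySem.List.insertBy (fun a b => decide (key a < key b)) x (y :: t) = x :: y :: t
          from by simp [PySem.List.insertBy, hlt]]
      cases hpx : p x
      · simp [List.filter_cons, hpx]
      · cases hpy : p y
        · have hins : PySem.List.insertBy (fun a b => decide (key a < key b)) x (t.filter p)
              = x :: t.filter p := by
            apply insertBy_head
            intro z hz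
            have hz' := List.mem_of_mem_filter hz
            simpa using lt_of_lt_of_le hlt (hy z hz')
          simp [List.filter_cons, hpx, hpy, hins]
        · simp [List.filter_cons, hpx, hpy, PySem.List.insertBy, hlt]
    · rw [show PySem.List.insertBy (fun a b => decide (key a < key b)) x (y :: t)
            = y :: PySem.List.insertBy (fun a b => decide (key a < key b)) x t
          from by simp [PySem.List.insertBy, hlt]]
      cases hpy : p y
      · simp only [List.filter_cons, hpy, Bool.false_eq_true, if_false]
        rw [ih ht]
      · simp only [List.filter_cons, hpy, if_true]
        rw [ih ht]
        cases hpx : p x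
        · simp
        · simp [PySem.List.insertBy, hlt]

lemma foldl_ins_filter {α : Type} (key : α → Int) (p : α → Bool) :
    ∀ (xs acc : List α), acc.Pairwise (fun a b => key a ≤ key b) →
    (xs.foldl (fun acc x => PySem.List.insertBy (fun a b => decide (key a < key b)) x acc) acc).filter p
      = (xs.filter p).foldl (fun acc x => PySem.List.insertBy (fun a b => decide (key a < key b)) x acc) (acc.filter p) := by
  intro xs
  induction xs with
  | nil => intro acc _; simp
  | cons x xs ih =>
    intro acc h
    simp only [List.foldl_cons, List.filter_cons]
    rw [ih _ (pairwise_insertBy key x acc h)]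
    rw [filter_insertBy key p x acc h]
    cases hpx : p x <;> simp [hpx]

-- a stable sort of a filtered list is the filtered stable sort
lemma sorted_filter {α : Type} (key : α → Int) (p : α → Bool) (xs : List α) :
    PySem.List.sorted (xs.filter p) key = (PySem.List.sorted xs key).filter p := by
  rw [PySem.List.sorted_eq_foldl_insertBy, PySem.List.sorted_eq_foldl_insertBy]
  simpa using (foldl_ins_filter key p xs [] (by simp)).symm

-- overwriting each (distinct) key once with g of its old value
lemma getD_overwrite (g : List String → List String) :
    ∀ (ks : List Int) (d : PySem.Dict Int (List String)), ks.Nodup → ∀ (c : Int),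
    (ks.foldl (fun d k => d.insert k (g (d.getD k []))) d).getD c []
      = if c ∈ ks then g (d.getD c []) else d.getD c [] := by
  intro ks
  induction ks with
  | nil => intro d _ c; simp
  | cons k rest ih =>
    intro d hnd c
    rw [List.nodup_cons] at hnd
    obtain ⟨hk, hrest⟩ := hnd
    simp only [List.foldl_cons]
    rw [ih _ hrest c]
    by_cases hc : c ∈ rest
    · have hck : c ≠ k := fun hh => hk (hh ▸ hc)
      simp [hc, PySem.Dict.getD_insert, hck, List.mem_cons]
    · rw [PySem.Dict.getD_insert]
      by_cases hck : c = k
      · subst hck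
        simp [hc]
      · simp [hck, hc, List.mem_cons]

lemma getD_foldl_insert_nil (key : String → Int) :
    ∀ (l : List String) (d : PySem.Dict Int (List String)),
    (∀ c, d.getD c [] = []) → ∀ (c : Int),
    (l.foldl (fun d w => d.insert (key w) ([] : List String)) d).getD c [] = [] := by
  intro l
  induction l with
  | nil => intro d h c; exact h c
  | cons w l ih =>
    intro d h c
    simp only [List.foldl_cons]
    refine ih _ ?_ c
    intro c'
    rw [PySem.Dict.getD_insert]
    by_cases hc : c' = key w
    · simp [hc]
    · simp [hc, h c']

lemma set_update_subset (s : PySem.Set Int) (xs : List Int) (h : ∀ x ∈ xs, x ∈ s) :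
    PySem.Set.update s xs = s := by
  rw [PySem.Set.update_eq_append_filter]
  have hnil : (PySem.Set.ofList xs).filter (fun y => !PySem.Set.contains s y) = [] := by
    rw [List.filter_eq_nil_iff]
    intro y hy
    have hyx : y ∈ xs := (PySem.Set.mem_ofList _ _).mp hy
    simpa using h y hyx
  rw [hnil, List.append_nil]

-- iterating a dict's own keys, replacing each bucket by its sorted version
lemma loop2_items (d : PySem.Dict Int (List String)) (hnd : d.keys.Nodup) :
    (d.keys.foldl (fun d key =>
        d.insert key (PySem.List.sorted (d.getD key []) (fun w => PySem.Str.len w))) d).items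
      = d.keys.map (fun k => (k, PySem.List.sorted (d.getD k []) (fun w => PySem.Str.len w))) := by
  have hkeys : (d.keys.foldl (fun d key =>
      d.insert key (PySem.List.sorted (d.getD key []) (fun w => PySem.Str.len w))) d).keys = d.keys := by
    rw [PySem.Dict.keys_foldl_insert_key d.keys (fun k => k)
      (fun d k => PySem.List.sorted (d.getD k []) (fun w => PySem.Str.len w)) d]
    rw [List.map_id']
    exact set_update_subset _ _ (fun x hx => hx)
  rw [PySem.Dict.items_eq_map_keys _ (by rw [hkeys]; exact hnd) []]
  rw [hkeys]
  apply List.map_congr_left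
  intro k hk
  rw [getD_overwrite (fun v => PySem.List.sorted v (fun w => PySem.Str.len w)) d.keys d hnd k]
  simp [hk]

lemma A_char (arr : List String) :
    categorize_and_sort arr
      = (PySem.Set.ofList (arr.map vowelsA)).map
          (fun k => (k, PySem.List.sorted (arr.filter (fun w => vowelsA w == k))
            (fun w => PySem.Str.len w))) := by
  show (PySem.Dict.items
      ((arr.foldl (fun d word =>
          let vowel_count := vowelsA word
          if d.contains vowel_count = false then d.insert vowel_count [word]
          else d.insert vowel_count (d.getD vowel_count [] ++ [word])) PySem.Dict.empty).keys.foldl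
        (fun d key => d.insert key (PySem.List.sorted (d.getD key []) (fun w => PySem.Str.len w)))
        (arr.foldl (fun d word =>
          let vowel_count := vowelsA word
          if d.contains vowel_count = false then d.insert vowel_count [word]
          else d.insert vowel_count (d.getD vowel_count [] ++ [word])) PySem.Dict.empty)))
    = _
  have hbody : arr.foldl (fun d word =>
        let vowel_count := vowelsA word
        if d.contains vowel_count = false then d.insert vowel_count [word]
        else d.insert vowel_count (d.getD vowel_count [] ++ [word])) PySem.Dict.empty
      = arr.foldl (fun d word => d.modify (vowelsA word) [] (fun l => l ++ [word]))
          PySem.Dict.empty := by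
    apply PySem.List.foldl_congr_mem
    intro d w _
    by_cases hc : d.contains (vowelsA w) = false
    · simp [hc, PySem.Dict.modify, PySem.Dict.getD_of_not_contains _ ([] : List String) hc]
    · simp [hc, PySem.Dict.modify]
  rw [hbody]
  set d1 := arr.foldl (fun d word => d.modify (vowelsA word) [] (fun l => l ++ [word]))
    PySem.Dict.empty with hd1
  have hk1 : d1.keys = PySem.Set.ofList (arr.map vowelsA) := by
    rw [hd1, PySem.Dict.keys_foldl_modify_key arr vowelsA [] (fun d x v => v ++ [x])
      PySem.Dict.empty]
    simp [PySem.Dict.keys_empty, PySem.Set.update_nil_left]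
  have hnd1 : d1.keys.Nodup := by rw [hk1]; exact PySem.Set.nodup_ofList _
  have hg1 : ∀ c, d1.getD c [] = arr.filter (fun w => vowelsA w == c) := by
    intro c
    rw [hd1, show arr.foldl (fun d word => d.modify (vowelsA word) [] (fun l => l ++ [word]))
          PySem.Dict.empty
        = (arr.map (fun w => (vowelsA w, w))).foldl
            (fun d p => d.modify p.1 [] (fun l => l ++ [p.2])) PySem.Dict.empty
      from by rw [List.foldl_map]]
    rw [PySem.Dict.getD_foldl_modify_append]
    simp [List.filter_map, List.map_map, Function.comp_def]
  rw [loop2_items d1 hnd1, hk1]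
  apply List.map_congr_left
  intro k _
  rw [hg1 k]

lemma B_char (arr : List String) :
    categorize_and_sort_alt arr
      = (PySem.Set.ofList (arr.map vowelsB)).map
          (fun k => (k, (PySem.List.sorted arr (fun w => PySem.Str.len w)).filter
            (fun w => vowelsB w == k))) := by
  show (PySem.Dict.items
      ((PySem.List.sorted arr (fun w => PySem.Str.len w)).foldl
        (fun d w => d.modify (vowelsB w) [] (fun l => l ++ [w]))
        (arr.foldl (fun d w => d.insert (vowelsB w) []) PySem.Dict.empty)))
    = _
  set d1 := arr.foldl (fun d w => d.insert (vowelsB w) []) PySem.Dict.empty with hd1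
  have hk1 : d1.keys = PySem.Set.ofList (arr.map vowelsB) := by
    rw [hd1, PySem.Dict.keys_foldl_insert_key arr vowelsB (fun d w => []) PySem.Dict.empty]
    simp [PySem.Dict.keys_empty, PySem.Set.update_nil_left]
  have hnd1 : d1.keys.Nodup := by rw [hk1]; exact PySem.Set.nodup_ofList _
  have hg1 : ∀ c, d1.getD c [] = [] := by
    intro c
    rw [hd1]
    exact getD_foldl_insert_nil vowelsB arr PySem.Dict.empty (fun c' => by simp) c
  set S := PySem.List.sorted arr (fun w => PySem.Str.len w) with hS
  have hk2 : (S.foldl (fun d w => d.modify (vowelsB w) [] (fun l => l ++ [w])) d1).keys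
      = d1.keys := by
    rw [PySem.Dict.keys_foldl_modify_key S vowelsB [] (fun d x v => v ++ [x]) d1]
    apply set_update_subset
    intro x hx
    rw [hk1]
    rcases List.mem_map.mp hx with ⟨w, hw, rfl⟩
    exact (PySem.Set.mem_ofList _ _).mpr
      (List.mem_map.mpr ⟨w, (PySem.List.mem_sorted _ _ _ _).mp (hS ▸ hw), rfl⟩)
  have hg2 : ∀ c, (S.foldl (fun d w => d.modify (vowelsB w) [] (fun l => l ++ [w])) d1).getD c []
      = S.filter (fun w => vowelsB w == c) := by
    intro c
    rw [show S.foldl (fun d w => d.modify (vowelsB w) [] (fun l => l ++ [w])) d1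
        = (S.map (fun w => (vowelsB w, w))).foldl
            (fun d p => d.modify p.1 [] (fun l => l ++ [p.2])) d1
      from by rw [List.foldl_map]]
    rw [PySem.Dict.getD_foldl_modify_append]
    rw [hg1 c]
    simp [List.filter_map, List.map_map, Function.comp_def]
  rw [PySem.Dict.items_eq_map_keys _ (by rw [hk2]; exact hnd1) []]
  rw [hk2, hk1]
  apply List.map_congr_left
  intro k _
  rw [hg2 k]

-- ===== VERDICT (by name: the statement is the Claim_ definition above) =====
theorem categorize_and_sort_spec : Claim_equal_categorize_and_sort := by
  intro arr _
  unfold Spec_categorize_and_sort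
  rw [A_char, B_char]
  have hv : vowelsB = vowelsA := funext fun w => (vc_eq w).symm
  rw [hv]
  apply List.map_congr_left
  intro k _
  rw [sorted_filter (fun w => PySem.Str.len w) (fun w => vowelsA w == k) arr]
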